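-- pv_equiv track=rewrite | github.com/MinusBrute86/MyProjects | CodeWarsTraining/Sum&ConsecutivePowers.py | sum_dig_pow3
-- ===== SOURCE A (Python) =====
-- def sum_dig_pow3(a, b): # range(a, b + 1) will be studied by the function
--     res = []
--     for number in range(a, b+1):
--         digits = [int(i) for i in str(number)]
--         s = 0
--         for idx, val in enumerate(digits):
--             s += val ** (idx + 1)
--         if s == number:
--             res.append(number)
--     return res
-- ===== SOURCE B (Python) =====
-- def sum_dig_pow3(a, b):
--     # Arithmetic re-implementation: no string round-trip. powsum(n) walks the
--     # number with //10 and %10, returning (digit_count, positional power sum).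
--     def powsum(n):
--         if n < 10:
--             return 1, n
--         k, s = powsum(n // 10)
--         return k + 1, s + (n % 10) ** (k + 1)
--     return [n for n in range(a, b + 1) if powsum(n)[1] == n]
-- ===== Notes on version B (the rewrite author's own statement) =====
-- stated objective: alternative
-- what changed: B replaces A's str(number)/int(char) round-trip and enumerate accumulator loop with a pure arithmetic recursion on n//10 that returns (digit count, positional power sum), and a filter comprehension instead of an explicit append loop.
import Mathlib
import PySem

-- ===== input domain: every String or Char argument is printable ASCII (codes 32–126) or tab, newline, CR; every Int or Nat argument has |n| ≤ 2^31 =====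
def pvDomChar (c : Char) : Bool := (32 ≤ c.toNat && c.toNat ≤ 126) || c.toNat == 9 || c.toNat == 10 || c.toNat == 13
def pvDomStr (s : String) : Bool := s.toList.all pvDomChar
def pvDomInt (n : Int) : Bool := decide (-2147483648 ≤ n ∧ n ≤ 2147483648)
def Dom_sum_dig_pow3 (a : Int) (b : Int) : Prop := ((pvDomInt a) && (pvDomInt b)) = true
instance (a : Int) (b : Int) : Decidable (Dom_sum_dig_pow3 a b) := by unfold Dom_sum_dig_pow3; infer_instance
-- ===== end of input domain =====

-- B replaces A's string round-trip (str(number), int(char), enumerate loop) by an arithmetic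
-- recursion on n // 10 returning (digit count, positional power sum), and a filter instead of
-- an explicit append loop; same cost, no string machinery.

-- ===== PORT A =====
-- str(number) → PySem.Int.toChars; int(i) for a one-char string i → PySem.Int.ofChars? [i]
-- (under Pre_ every character is a decimal digit so ofChars? is always `some`; `.getD 0`
-- only stands in for the ValueError Python raises outside Pre_); val ** (idx+1) with
-- idx ≥ 0 → ^ (idx+1).toNat (exact, enumerate indices are nonnegative).
def sum_dig_pow3 (a : Int) (b : Int) : List Int :=
  (PySem.List.pyRange a (b + 1) 1).foldl (fun res number =>
    let digits : List Int :=
      (PySem.Int.toChars number).map (fun i => (PySem.Int.ofChars? [i]).getD 0)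
    let s : Int :=
      (PySem.List.enumerate digits).foldl (fun s p => s + p.2 ^ (p.1 + 1).toNat) 0
    if s = number then res ++ [number] else res) []

-- ===== PORT B =====
-- powsum(n) of Source B: (n % 10) ** (k + 1) with k ≥ 1 → ^ (k+1).toNat (exact, k+1 > 0).
def powsumAux (n : Int) : Int × Int :=
  if n < 10 then (1, n)
  else
    let p := powsumAux (PySem.Int.floordiv n 10)
    (p.1 + 1, p.2 + (PySem.Int.mod n 10) ^ (p.1 + 1).toNat)
termination_by n.toNat
decreasing_by
  simp only [PySem.Int.floordiv]
  rename_i h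
  have he : Int.fdiv n 10 = n / 10 := Int.fdiv_eq_ediv_of_nonneg _ (by norm_num)
  omega

def sum_dig_pow3_alt (a : Int) (b : Int) : List Int :=
  (PySem.List.pyRange a (b + 1) 1).filter (fun n => (powsumAux n).2 == n)

-- ===== PRECONDITION & SPEC =====
-- A raises ValueError (int('-') on the sign character) as soon as range(a, b+1) contains a
-- negative number; Pre_ excludes exactly those inputs (empty ranges are fine for any a, b).
def Pre_sum_dig_pow3 (a : Int) (b : Int) : Prop := 0 ≤ a ∨ b < a
instance (a : Int) (b : Int) : Decidable (Pre_sum_dig_pow3 a b) := by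
  unfold Pre_sum_dig_pow3; infer_instance

def pvWitness_sum_dig_pow3 : Int × Int := (0, 200)

def Spec_sum_dig_pow3 (a : Int) (b : Int) (out : List Int) : Prop := out = sum_dig_pow3_alt a b
instance (a : Int) (b : Int) (out : List Int) : Decidable (Spec_sum_dig_pow3 a b out) := by
  unfold Spec_sum_dig_pow3; infer_instance

-- ===== CLAIM (what is proved, stated in full; the proofs are below) =====
def Claim_equal_sum_dig_pow3 : Prop := ∀ (a : Int) (b : Int), Dom_sum_dig_pow3 a b → Pre_sum_dig_pow3 a b → Spec_sum_dig_pow3 a b (sum_dig_pow3 a b)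

-- ===== LEMMAS AND PROOFS =====

-- A's inner loop, as a function of the character list of str(number).
def sumA (cs : List Char) : Int :=
  (PySem.List.enumerate (cs.map (fun i => (PySem.Int.ofChars? [i]).getD 0))).foldl
    (fun s p => s + p.2 ^ (p.1 + 1).toNat) 0

lemma toDigitsCore_split (f : Nat) : ∀ (n : Nat) (ds : List Char), n < f →
    Nat.toDigitsCore 10 f n ds = Nat.toDigitsCore 10 f n [] ++ ds := by
  induction f with
  | zero => intro n ds h; omega
  | succ f ih =>
    intro n ds h
    simp only [Nat.toDigitsCore]
    by_cases h0 : n / 10 = 0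
    · simp [h0]
    · have hn : 10 ≤ n := by
        by_contra hc; exact h0 (Nat.div_eq_of_lt (by omega))
      have hf : n / 10 < f := by
        have := Nat.div_lt_self (by omega : 0 < n) (by norm_num : 1 < 10)
        omega
      simp only [h0, if_false]
      rw [ih (n / 10) (Nat.digitChar (n % 10) :: ds) hf,
          ih (n / 10) [Nat.digitChar (n % 10)] hf]
      simp

lemma toDigitsCore_fuel (f₁ : Nat) : ∀ (f₂ n : Nat) (ds : List Char), n < f₁ → n < f₂ →
    Nat.toDigitsCore 10 f₁ n ds = Nat.toDigitsCore 10 f₂ n ds := by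
  induction f₁ with
  | zero => intro f₂ n ds h1 _; omega
  | succ f₁ ih =>
    intro f₂ n ds h1 h2
    cases f₂ with
    | zero => omega
    | succ f₂ =>
      simp only [Nat.toDigitsCore]
      by_cases h0 : n / 10 = 0
      · simp [h0]
      · have hn : 10 ≤ n := by
          by_contra hc; exact h0 (Nat.div_eq_of_lt (by omega))
        have hd : n / 10 < n := Nat.div_lt_self (by omega) (by norm_num)
        simp only [h0, if_false]
        exact ih f₂ (n / 10) _ (by omega) (by omega)

lemma toDigits_small {n : Nat} (h : n < 10) : Nat.toDigits 10 n = [Nat.digitChar n] := by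
  simp [Nat.toDigits, Nat.toDigitsCore, Nat.div_eq_of_lt h, Nat.mod_eq_of_lt h]

lemma toDigits_step {n : Nat} (h : 10 ≤ n) :
    Nat.toDigits 10 n = Nat.toDigits 10 (n / 10) ++ [Nat.digitChar (n % 10)] := by
  have h0 : n / 10 ≠ 0 := by
    intro hc
    have := Nat.div_eq_of_lt (show n < 10 by omega)
    omega
  have hd : n / 10 < n := Nat.div_lt_self (by omega) (by norm_num)
  show Nat.toDigitsCore 10 (n + 1) n [] = _
  simp only [Nat.toDigitsCore, h0, if_false]
  rw [toDigitsCore_split n (n / 10) [Nat.digitChar (n % 10)] hd]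
  rw [toDigitsCore_fuel n ((n / 10) + 1) (n / 10) [] hd (by omega)]
  rfl

lemma ofChars_digitChar {d : Nat} (h : d < 10) :
    PySem.Int.ofChars? [Nat.digitChar d] = some (d : Int) := by
  interval_cases d <;> decide

lemma sumA_append (cs : List Char) (c : Char) :
    sumA (cs ++ [c]) =
      sumA cs + ((PySem.Int.ofChars? [c]).getD 0) ^ (cs.length + 1) := by
  unfold sumA
  rw [List.map_append, PySem.List.enumerate_append, List.foldl_append]
  simp only [List.map_cons, List.map_nil, List.length_map,
    PySem.List.enumerate_cons, PySem.List.enumerate_nil, List.foldl_cons, List.foldl_nil]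
  congr 1
  have : ((0 : Int) + (cs.length : Int) + 1).toNat = cs.length + 1 := by omega
  rw [this]

lemma powsumAux_eq (m : Nat) :
    powsumAux (m : Int) = (((Nat.toDigits 10 m).length : Int), sumA (Nat.toDigits 10 m)) := by
  induction m using Nat.strong_induction_on with
  | _ m ih =>
    by_cases h : m < 10
    · rw [powsumAux]
      simp only [show ((m : Int) < 10) from by exact_mod_cast h, if_true]
      rw [toDigits_small h]
      unfold sumA
      simp only [List.map_cons, List.map_nil, PySem.List.enumerate_cons,
        PySem.List.enumerate_nil, List.foldl_cons, List.foldl_nil,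
        ofChars_digitChar h, Option.getD_some]
      norm_num
    · have h10 : 10 ≤ m := by omega
      rw [powsumAux]
      have hlt : ¬ ((m : Int) < 10) := by exact_mod_cast h
      simp only [hlt, if_false]
      have hdiv : PySem.Int.floordiv (m : Int) 10 = ((m / 10 : Nat) : Int) := by
        simp only [PySem.Int.floordiv]
        rw [Int.fdiv_eq_ediv_of_nonneg _ (by norm_num)]
        omega
      have hmod : PySem.Int.mod (m : Int) 10 = ((m % 10 : Nat) : Int) := by
        simp only [PySem.Int.mod]
        rw [Int.fmod_eq_emod]
        simp
      rw [hdiv, hmod, ih (m / 10) (Nat.div_lt_self (by omega) (by norm_num))]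
      rw [toDigits_step h10, sumA_append, ofChars_digitChar (Nat.mod_lt m (by norm_num))]
      have hlen : (((Nat.toDigits 10 (m / 10)).length : Int) + 1).toNat
          = (Nat.toDigits 10 (m / 10)).length + 1 := by omega
      simp [hlen]

lemma test_eq (n : Int) (hn : 0 ≤ n) :
    sumA (PySem.Int.toChars n) = (powsumAux n).2 := by
  have h : PySem.Int.toChars n = Nat.toDigits 10 n.toNat := by
    simp [PySem.Int.toChars, not_lt.mpr hn]
  have hcast : ((n.toNat : Nat) : Int) = n := Int.toNat_of_nonneg hn
  rw [h]
  have hps := powsumAux_eq n.toNat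
  rw [hcast] at hps
  rw [hps]

lemma fold_filter (l : List Int) (hl : ∀ x ∈ l, 0 ≤ x) : ∀ (acc : List Int),
    l.foldl (fun res number =>
      let digits : List Int :=
        (PySem.Int.toChars number).map (fun i => (PySem.Int.ofChars? [i]).getD 0)
      let s : Int :=
        (PySem.List.enumerate digits).foldl (fun s p => s + p.2 ^ (p.1 + 1).toNat) 0
      if s = number then res ++ [number] else res) acc
    = acc ++ l.filter (fun n => (powsumAux n).2 == n) := by
  induction l with
  | nil => intro acc; simp
  | cons x xs ih =>
    intro acc
    have hx : 0 ≤ x := hl x (by simp)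
    have hxs : ∀ y ∈ xs, 0 ≤ y := fun y hy => hl y (by simp [hy])
    simp only [List.foldl_cons, List.filter_cons]
    have hs : ((PySem.List.enumerate
        ((PySem.Int.toChars x).map (fun i => (PySem.Int.ofChars? [i]).getD 0))).foldl
        (fun s p => s + p.2 ^ (p.1 + 1).toNat) 0) = (powsumAux x).2 := test_eq x hx
    by_cases hc : (powsumAux x).2 = x
    · simp only [hs, hc, if_true, beq_self_eq_true, ih hxs]
      simp
    · have : ((powsumAux x).2 == x) = false := by simp [hc]
      simp only [hs, hc, if_false, this, ih hxs]
      simp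

-- ===== VERDICT (by name: the statement is the Claim_ definition above) =====
theorem sum_dig_pow3_spec : Claim_equal_sum_dig_pow3 := by
  intro a b _ hpre
  unfold Spec_sum_dig_pow3 sum_dig_pow3 sum_dig_pow3_alt
  rcases hpre with ha | hba
  · exact (fold_filter _ (fun x hx => le_trans ha (PySem.List.mem_pyRange_one.mp hx).1) []).trans
      (by simp)
  · rw [PySem.List.pyRange_one_eq_nil (by omega)]
    simp
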